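-- pv_equiv track=rewrite | github.com/Mediledger-Nexus/MediLedger-Nexus-Backend | src/mediledger_nexus/utils/helpers.py | _analyze_vital_trends
-- ===== SOURCE A (Python) =====
-- from typing import Any, Dict, List, Optional, Tuple, Union
--
-- def _analyze_vital_trends(vital_history: List[Dict[str, Any]]) -> Dict[str, str]:
--     """Analyze trends in vital signs"""
--     trends = {}
--
--     if len(vital_history) < 2:
--         return trends
--
--     # Simple trend analysis for blood pressure
--     bp_systolic_values = [v.get("blood_pressure_systolic") for v in vital_history if v.get("blood_pressure_systolic")]
--
--     if len(bp_systolic_values) >= 2: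
--         if bp_systolic_values[-1] > bp_systolic_values[-2]:
--             trends["blood_pressure"] = "increasing"
--         elif bp_systolic_values[-1] < bp_systolic_values[-2]:
--             trends["blood_pressure"] = "decreasing"
--         else:
--             trends["blood_pressure"] = "stable"
--
--     return trends
-- ===== SOURCE B (Python) =====
-- from typing import Any, Dict, List, Optional, Tuple, Union
--
-- def _analyze_vital_trends(vital_history: List[Dict[str, Any]]) -> Dict[str, str]:
--     """Analyze trends in vital signs (reverse scan, stops after two readings)"""
--     trends = {}
--     if len(vital_history) < 2:
--         return trends
--     recent = []
--     for v in reversed(vital_history):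
--         s = v.get("blood_pressure_systolic")
--         if s:
--             recent.append(s)
--             if len(recent) == 2:
--                 break
--     if len(recent) < 2:
--         return trends
--     last, prev = recent[0], recent[1]
--     if last > prev:
--         trends["blood_pressure"] = "increasing"
--     elif last < prev:
--         trends["blood_pressure"] = "decreasing"
--     else:
--         trends["blood_pressure"] = "stable"
--     return trends
-- ===== Notes on version B (the rewrite author's own statement) =====
-- stated objective: alternative
-- what changed: Replaces building the full filtered list of systolic readings plus negative indexing with a single reverse scan that stops as soon as the two most recent truthy readings are collected.
import Mathlib
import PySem

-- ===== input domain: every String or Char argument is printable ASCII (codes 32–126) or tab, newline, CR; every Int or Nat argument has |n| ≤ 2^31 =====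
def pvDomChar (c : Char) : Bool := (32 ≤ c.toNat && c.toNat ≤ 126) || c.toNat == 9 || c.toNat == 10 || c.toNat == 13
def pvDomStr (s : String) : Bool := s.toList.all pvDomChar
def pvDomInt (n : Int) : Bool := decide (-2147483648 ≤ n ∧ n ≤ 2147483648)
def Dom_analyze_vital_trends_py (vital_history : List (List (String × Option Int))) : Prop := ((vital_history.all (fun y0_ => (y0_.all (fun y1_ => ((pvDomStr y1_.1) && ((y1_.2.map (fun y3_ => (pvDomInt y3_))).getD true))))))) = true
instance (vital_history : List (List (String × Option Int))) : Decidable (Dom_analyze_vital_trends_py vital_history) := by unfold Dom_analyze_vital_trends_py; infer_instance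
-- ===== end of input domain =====

-- B replaces A's full filtered list + negative indexing with a reverse scan that stops after collecting the two most recent truthy systolic readings (alternative decomposition, same result).

-- ===== PORT A =====
def pvGetBP (v : List (String × Option Int)) : Option Int :=
  match List.lookup "blood_pressure_systolic" v with
  | some (some n) => if n != 0 then some n else none
  | _ => none

def analyze_vital_trends_py (vital_history : List (List (String × Option Int))) : List (String × String) :=
  if vital_history.length < 2 then []
  else
    let bp_systolic_values := vital_history.filterMap pvGetBP
    if bp_systolic_values.length ≥ 2 then
      match PySem.List.pyGet? bp_systolic_values (-1), PySem.List.pyGet? bp_systolic_values (-2) with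
      | some a, some b =>
        if a > b then [("blood_pressure", "increasing")]
        else if a < b then [("blood_pressure", "decreasing")]
        else [("blood_pressure", "stable")]
      | _, _ => []
    else []

-- ===== PORT B =====
def pvBpOf (v : List (String × Option Int)) : Option Int :=
  match List.lookup "blood_pressure_systolic" v with
  | none => none
  | some none => none
  | some (some n) => if n = 0 then none else some n

def pvCollectRecent : List (List (String × Option Int)) → List Int → List Int
  | [], acc => acc
  | v :: rest, acc =>
    let acc' := match pvBpOf v with
      | some n => acc ++ [n]
      | none => acc
    if acc'.length = 2 then acc' else pvCollectRecent rest acc'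

def analyze_vital_trends_py_alt (vital_history : List (List (String × Option Int))) : List (String × String) :=
  if vital_history.length < 2 then []
  else
    match pvCollectRecent vital_history.reverse [] with
    | [last, prev] =>
      if last > prev then [("blood_pressure", "increasing")]
      else if last < prev then [("blood_pressure", "decreasing")]
      else [("blood_pressure", "stable")]
    | _ => []

-- ===== PRECONDITION & SPEC =====
def Spec_analyze_vital_trends_py (vital_history : List (List (String × Option Int))) (out : List (String × String)) : Prop := out = analyze_vital_trends_py_alt vital_history
instance (vital_history : List (List (String × Option Int))) (out : List (String × String)) : Decidable (Spec_analyze_vital_trends_py vital_history out) := by unfold Spec_analyze_vital_trends_py; infer_instance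

-- ===== CLAIM (what is proved, stated in full; the proofs are below) =====
def Claim_equal_analyze_vital_trends_py : Prop := ∀ (vital_history : List (List (String × Option Int))), Dom_analyze_vital_trends_py vital_history → Spec_analyze_vital_trends_py vital_history (analyze_vital_trends_py vital_history)

-- ===== LEMMAS AND PROOFS =====
theorem pvBpOf_eq_getBP (v : List (String × Option Int)) : pvBpOf v = pvGetBP v := by
  unfold pvBpOf pvGetBP
  cases List.lookup "blood_pressure_systolic" v with
  | none => rfl
  | some o =>
    cases o with
    | none => rfl
    | some n => by_cases h : n = 0 <;> simp [h]

theorem pvCollectRecent_eq_take (l : List (List (String × Option Int))) (acc : List Int)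
    (h : acc.length < 2) : pvCollectRecent l acc = (acc ++ l.filterMap pvBpOf).take 2 := by
  induction l generalizing acc with
  | nil => simp [pvCollectRecent, List.take_of_length_le (le_of_lt h)]
  | cons v rest ih =>
    unfold pvCollectRecent
    cases hv : pvBpOf v with
    | none =>
      have : acc.length ≠ 2 := by omega
      simp only [this, if_false, ih acc h, List.filterMap_cons, hv]
    | some n =>
      simp only [hv, List.filterMap_cons]
      by_cases h2 : (acc ++ [n]).length = 2
      · simp only [h2, if_true]
        rw [show acc ++ n :: List.filterMap pvBpOf rest = (acc ++ [n]) ++ List.filterMap pvBpOf rest by simp]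
        rw [List.take_append_of_le_length (by omega), List.take_of_length_le (by omega)]
      · simp only [h2, if_false]
        rw [ih (acc ++ [n]) (by simp only [List.length_append, List.length_cons, List.length_nil] at h2 ⊢; omega)]
        simp


-- ===== VERDICT (by name: the statement is the Claim_ definition above) =====
theorem analyze_vital_trends_py_spec : Claim_equal_analyze_vital_trends_py := by
  intro vh _
  unfold Spec_analyze_vital_trends_py analyze_vital_trends_py analyze_vital_trends_py_alt
  by_cases hlen : vh.length < 2
  · simp [hlen]
  · simp only [hlen, if_false]
    have hbp : List.filterMap pvBpOf vh.reverse = (List.filterMap pvGetBP vh).reverse := by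
      rw [List.filterMap_reverse]; congr 1; exact List.filterMap_congr (fun v _ => pvBpOf_eq_getBP v)
    rw [pvCollectRecent_eq_take _ _ (by simp), List.nil_append, hbp]
    set bp := vh.filterMap pvGetBP
    by_cases h2 : bp.length ≥ 2
    · obtain ⟨a, b, t, hrev⟩ : ∃ a b t, bp.reverse = a :: b :: t := by
        match hr : bp.reverse with
        | [] => exfalso; have hl := congrArg List.length hr; simp only [List.length_reverse, List.length_nil] at hl; omega
        | [x] => exfalso; have hl := congrArg List.length hr; simp only [List.length_reverse, List.length_cons, List.length_nil] at hl; omega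
        | x :: y :: t => exact ⟨x, y, t, rfl⟩
      have hbpform : bp = t.reverse ++ [b, a] := by
        have := congrArg List.reverse hrev; simpa using this
      have hga : PySem.List.pyGet? bp (-1) = some a := by
        rw [PySem.List.pyGet?_neg_one, List.getLast?_eq_head?_reverse, hrev]; rfl
      have hgb : PySem.List.pyGet? bp (-2) = some b := by
        rw [PySem.List.pyGet?_neg_ofNat bp 2 (by omega) h2, hbpform]
        rw [show (t.reverse ++ [b, a]).length - 2 = t.reverse.length + 0 by simp]
        rw [List.getElem?_append_right (by omega)]
        simp
      simp only [ge_iff_le, h2, if_true, hga, hgb, hrev, List.take_succ_cons, List.take_zero]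
    · have hrt : (bp.reverse.take 2).length < 2 := by
        simp only [List.length_take, List.length_reverse]; omega
      match hr : bp.reverse.take 2 with
      | [] => simp [h2]
      | [x] => simp [h2]
      | x :: y :: t => rw [hr] at hrt; simp at hrt
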